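-- pv_equiv track=rewrite | github.com/Scarano/skimmer | skimmer/util.py | contiguous_spans
-- ===== SOURCE A (Python) =====
-- def contiguous_spans(ints: list[int]) -> list[tuple[int, int]]:
--     """
--     Find contiguous spans of incrementing integers in a list.
--     """
--
--     if not ints:
--         return []
--
--     spans = []
--     start = end = ints[0]
--
--     for i in ints[1:]:
--         if i == end + 1:
--             end = i
--         else:
--             spans.append((start, end))
--             start = end = i
--     spans.append((start, end))
--
--     return spans
-- ===== SOURCE B (Python) =====
-- def contiguous_spans(ints):
--     """
--     Find contiguous spans of incrementing integers in a list.
--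
--     Group elements by the value-minus-index invariant (constant exactly on
--     a contiguous incrementing run), then read off each group's ends.
--     """
--     groups = []
--     cur = []
--     for p in enumerate(ints):
--         if cur and p[1] - p[0] == cur[0][1] - cur[0][0]:
--             cur.append(p)
--         else:
--             if cur:
--                 groups.append(cur)
--             cur = [p]
--     if cur:
--         groups.append(cur)
--     return [(g[0][1], g[-1][1]) for g in groups]
-- ===== Notes on version B (the rewrite author's own statement) =====
-- stated objective: alternative
-- what changed: Replaces A's running (start,end) accumulator with a group-by-invariant decomposition: enumerate the list, partition it into maximal runs of constant value-minus-index key, then map each group to (first value, last value).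
import Mathlib
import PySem

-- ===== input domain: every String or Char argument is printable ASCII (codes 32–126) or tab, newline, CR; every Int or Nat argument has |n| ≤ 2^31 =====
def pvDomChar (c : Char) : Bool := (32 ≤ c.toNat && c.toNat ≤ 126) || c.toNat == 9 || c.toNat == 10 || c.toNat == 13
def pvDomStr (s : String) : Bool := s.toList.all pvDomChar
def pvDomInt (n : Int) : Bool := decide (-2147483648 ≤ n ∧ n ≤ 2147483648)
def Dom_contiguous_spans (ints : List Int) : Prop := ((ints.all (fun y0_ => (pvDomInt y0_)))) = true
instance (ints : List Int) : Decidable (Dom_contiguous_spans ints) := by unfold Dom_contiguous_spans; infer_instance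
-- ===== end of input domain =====

-- B replaces A's running (start,end) accumulator with a group-by-invariant
-- decomposition (enumerate, group by value-minus-index key, read off group ends);
-- same O(n) cost, alternative structure.

-- ===== PORT A =====
-- the for-loop over ints[1:] with state (spans, start, end)
def csLoopA : List Int → List (Int × Int) → Int → Int → List (Int × Int)
  | [], spans, start, end_ => spans ++ [(start, end_)]
  | i :: t, spans, start, end_ =>
    if i == end_ + 1 then csLoopA t spans start i
    else csLoopA t (spans ++ [(start, end_)]) i i

def contiguous_spans (ints : List Int) : List (Int × Int) :=
  match ints with
  | [] => []
  | h :: t => csLoopA t [] h h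

-- ===== PORT B =====
-- the for-loop over enumerate(ints) with state (groups, cur)
def csFoldB : List (Int × Int) → List (List (Int × Int)) → List (Int × Int) →
    List (List (Int × Int)) × List (Int × Int)
  | [], groups, cur => (groups, cur)
  | p :: ps, groups, cur =>
    if (!cur.isEmpty) && (p.2 - p.1 == (cur.headD (0, 0)).2 - (cur.headD (0, 0)).1)
    then csFoldB ps groups (cur ++ [p])
    else csFoldB ps (if cur.isEmpty then groups else groups ++ [cur]) [p]

-- [(g[0][1], g[-1][1]) for g in groups]
def csEnds (g : List (Int × Int)) : Int × Int := ((g.headD (0, 0)).2, (g.getLastD (0, 0)).2)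

def contiguous_spans_alt (ints : List Int) : List (Int × Int) :=
  let st := csFoldB (PySem.List.enumerate ints) [] []
  (if st.2.isEmpty then st.1 else st.1 ++ [st.2]).map csEnds

-- ===== PRECONDITION & SPEC =====
def Spec_contiguous_spans (ints : List Int) (out : List (Int × Int)) : Prop := out = contiguous_spans_alt ints
instance (ints : List Int) (out : List (Int × Int)) : Decidable (Spec_contiguous_spans ints out) := by unfold Spec_contiguous_spans; infer_instance

-- ===== CLAIM (what is proved, stated in full; the proofs are below) =====
def Claim_equal_contiguous_spans : Prop := ∀ (ints : List Int), Dom_contiguous_spans ints → Spec_contiguous_spans ints (contiguous_spans ints)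

-- ===== LEMMAS AND PROOFS =====

-- Invariant: B's current group cur has head (m, s) and last (l, e) with l = n - 1
-- (the last index consumed) and s - m = e - l (the key is constant on cur);
-- then finishing B from index n equals finishing A with state (spans, s, e).
theorem csFoldB_eq_csLoopA (t : List Int) :
    ∀ (n : Int) (groups : List (List (Int × Int))) (cur : List (Int × Int))
      (m s l e : Int) (spans : List (Int × Int)),
      groups.map csEnds = spans →
      cur.head? = some (m, s) → cur.getLast? = some (l, e) →
      l = n - 1 → s - m = e - l →
      (let st := csFoldB (PySem.List.enumerate t n) groups cur
       (if st.2.isEmpty then st.1 else st.1 ++ [st.2]).map csEnds)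
        = csLoopA t spans s e := by
  induction t with
  | nil =>
    intro n groups cur m s l e spans hg hh hl _ _
    cases cur with
    | nil => simp at hh
    | cons c cs =>
      have hc : c = (m, s) := by simpa using hh
      subst hc
      simp [PySem.List.enumerate, csFoldB, csLoopA, ← hg, csEnds,
        List.getLastD_eq_getLast?, hl]
  | cons i t ih =>
    intro n groups cur m s l e spans hg hh hl hln hkey
    cases cur with
    | nil => simp at hh
    | cons c rest =>
    have hc : c = (m, s) := by simpa using hh
    subst hc
    rw [PySem.List.enumerate_cons]
    by_cases hc : i = e + 1
    · have hbool : (i - n == s - m) = true := by simp; omega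
      have hbA : (i == e + 1) = true := by simpa using hc
      simp only [csFoldB, List.isEmpty_cons, Bool.not_false, List.headD_cons,
        Bool.true_and, hbool, if_true, csLoopA, hbA]
      exact ih (n + 1) groups (((m, s) :: rest) ++ [(n, i)]) m s n i spans hg
        (by simp) List.getLast?_concat (by ring) (by omega)
    · have hcond : ¬ ((i : Int) - n = s - m) := by omega
      simp only [csFoldB, List.isEmpty_cons, Bool.not_false, List.headD_cons, Bool.true_and,
        beq_iff_eq, if_neg hcond, csLoopA, beq_iff_eq, if_neg hc]
      refine ih (n + 1) (groups ++ [(m, s) :: rest]) [(n, i)] n i n i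
        (spans ++ [(s, e)]) ?_ (by simp) (by simp) (by ring) (by ring)
      simp [← hg, csEnds, List.getLastD_eq_getLast?, hl]

-- ===== VERDICT (by name: the statement is the Claim_ definition above) =====
theorem contiguous_spans_spec : Claim_equal_contiguous_spans := by
  intro ints _
  unfold Spec_contiguous_spans contiguous_spans contiguous_spans_alt
  cases ints with
  | nil => simp [PySem.List.enumerate, csFoldB]
  | cons h t =>
    rw [PySem.List.enumerate_cons]
    have key := csFoldB_eq_csLoopA t (0 + 1) [] [(0, h)] 0 h 0 h []
      rfl rfl rfl (by norm_num) (by norm_num)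
    simpa [csFoldB] using key.symm
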